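-- pv_equiv track=rewrite | github.com/HengyeXiang/prmtop_prep | PDBrf.py | modify_solvent_columns
-- ===== SOURCE A (Python) =====
-- def modify_fifth_column(line, value):
--     parts = line.split()
--     int_val = int(value)
--     if (int_val<10):
--         return line[:25] + str(value) + line[26:]
--     elif (int_val >=10 and int_val <100):
--         return line[:24] + str(value) + line[26:]
--     elif (int_val >= 100 and int_val <1000):
--         return line[:23] + str(value) + line[26:]
--
-- def modify_solvent_columns(lines, atoms_solvents):
--     modified_lines = []
--     increment_value = 3
--     for i, line in enumerate(lines):
--         modified_line = modify_fifth_column(line, increment_value)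
--         if (i + 1) % atoms_solvents == 0:
--             increment_value += 1
--         modified_lines.append(modified_line)
--     return modified_lines
-- ===== SOURCE B (Python) =====
-- def modify_solvent_columns(lines, atoms_solvents):
--     out = []
--     for start in range(0, len(lines), atoms_solvents):
--         s = str(3 + start // atoms_solvents)
--         cut = 26 - len(s)
--         for line in lines[start:start + atoms_solvents]:
--             out.append(line[:cut] + s + line[26:])
--     return out
-- ===== Notes on version B (the rewrite author's own statement) =====
-- stated objective: simpler
-- what changed: Replaces enumerate with a threaded mutable counter and a '(i+1) % atoms_solvents == 0' reset, plus the three-branch column helper, by iterating directly over solvent blocks (range with step atoms_solvents), computing each block's residue number in closed form and its single splice position as 26 - len(str(value)); dropping the helper also drops its unused per-line line.split(), a constant-factor win.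
-- outside the precondition, e.g. on modify_solvent_columns(['x'], -1): A returns ['x3'], B returns []
import Mathlib
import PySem

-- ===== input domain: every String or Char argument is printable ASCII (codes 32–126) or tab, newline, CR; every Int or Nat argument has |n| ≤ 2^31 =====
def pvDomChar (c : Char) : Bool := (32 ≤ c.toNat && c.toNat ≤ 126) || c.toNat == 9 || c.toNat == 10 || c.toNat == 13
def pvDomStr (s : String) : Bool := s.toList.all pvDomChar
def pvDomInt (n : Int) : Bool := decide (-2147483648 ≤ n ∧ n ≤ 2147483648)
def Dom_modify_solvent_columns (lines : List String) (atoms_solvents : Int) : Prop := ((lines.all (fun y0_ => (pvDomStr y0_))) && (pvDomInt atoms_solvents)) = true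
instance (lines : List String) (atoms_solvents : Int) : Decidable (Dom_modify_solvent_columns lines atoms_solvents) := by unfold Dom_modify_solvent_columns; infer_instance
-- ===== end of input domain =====

-- B iterates over solvent blocks (range with step atoms_solvents) and splices the residue
-- number at position 26 - len(str(value)), replacing A's per-line counter threading with
-- its modular reset and the three-branch column helper: simpler decomposition, same cost.


-- ===== PORT A =====
def modify_fifth_column (line : String) (value : Int) : Option String :=
  let _parts := PySem.Chars.split₀ line.toList   -- 'parts' is computed and never used in the Python too
  let int_val := value                            -- int(value): value is already an int
  if int_val < 10 then
    some (String.ofList (PySem.List.slice line.toList none (some 25) ++ PySem.Int.toChars value ++ PySem.List.slice line.toList (some 26) none))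
  else if 10 ≤ int_val ∧ int_val < 100 then
    some (String.ofList (PySem.List.slice line.toList none (some 24) ++ PySem.Int.toChars value ++ PySem.List.slice line.toList (some 26) none))
  else if 100 ≤ int_val ∧ int_val < 1000 then
    some (String.ofList (PySem.List.slice line.toList none (some 23) ++ PySem.Int.toChars value ++ PySem.List.slice line.toList (some 26) none))
  else none                                       -- Python falls off the end: returns None (outside Pre_)

def modify_solvent_columns (lines : List String) (atoms_solvents : Int) : List String :=
  ((PySem.List.enumerate lines).foldl
    (fun st p =>
      let modified_line := (modify_fifth_column p.2 st.2).getD ""   -- the None case never occurs inside Pre_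
      let increment_value := if PySem.Int.mod (p.1 + 1) atoms_solvents = 0 then st.2 + 1 else st.2
      (st.1 ++ [modified_line], increment_value))
    (([] : List String), (3 : Int))).1

-- ===== PORT B =====
def modify_solvent_columns_alt (lines : List String) (atoms_solvents : Int) : List String :=
  (PySem.List.pyRange 0 (lines.length : Int) atoms_solvents).foldl
    (fun out start =>
      let s := PySem.Int.toChars (3 + PySem.Int.floordiv start atoms_solvents)
      let cut : Int := 26 - (s.length : Int)
      out ++ (PySem.List.slice lines (some start) (some (start + atoms_solvents))).map
        (fun line => String.ofList (PySem.List.slice line.toList none (some cut) ++ s ++ PySem.List.slice line.toList (some 26) none)))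
    []

-- ===== PRECONDITION & SPEC =====
-- Pre_ restricts to the function's natural domain: atoms_solvents is a positive solvent size
-- (A raises ZeroDivisionError at 0, and for negative counts A's values are accidental while B
-- returns []), and lines is short enough that every residue number stays below 1000 (beyond
-- that A's helper falls off its branches and returns None, which is not a string).
def Pre_modify_solvent_columns (lines : List String) (atoms_solvents : Int) : Prop :=
  0 < atoms_solvents ∧ (lines.length : Int) ≤ 997 * atoms_solvents
instance (lines : List String) (atoms_solvents : Int) : Decidable (Pre_modify_solvent_columns lines atoms_solvents) := by unfold Pre_modify_solvent_columns; infer_instance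

def pvWitness_modify_solvent_columns : List String × Int := (["HETATM  123  O   WAT A   1      11.104  "], 1)

def Spec_modify_solvent_columns (lines : List String) (atoms_solvents : Int) (out : List String) : Prop := out = modify_solvent_columns_alt lines atoms_solvents
instance (lines : List String) (atoms_solvents : Int) (out : List String) : Decidable (Spec_modify_solvent_columns lines atoms_solvents out) := by unfold Spec_modify_solvent_columns; infer_instance

-- ===== CLAIM (what is proved, stated in full; the proofs are below) =====
def Claim_equal_modify_solvent_columns : Prop := ∀ (lines : List String) (atoms_solvents : Int), Dom_modify_solvent_columns lines atoms_solvents → Pre_modify_solvent_columns lines atoms_solvents → Spec_modify_solvent_columns lines atoms_solvents (modify_solvent_columns lines atoms_solvents)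

-- ===== LEMMAS AND PROOFS =====

-- The common per-line splice both programs perform for a residue number v.
def pvPf (v : Int) (cs : List Char) : List Char :=
  PySem.List.slice cs none (some (26 - ((PySem.Int.toChars v).length : Int)))
    ++ PySem.Int.toChars v ++ PySem.List.slice cs (some 26) none

-- The intended result: line at absolute index s gets residue number 3 + s / n.
def pvSpec (n : Nat) : Nat → List String → List String
  | _, [] => []
  | s, line :: rest => String.ofList (pvPf (3 + ((s / n : Nat) : Int)) line.toList) :: pvSpec n (s + 1) rest

-- controlled unfolding of Nat.toDigitsCore
lemma pvTDC_stop (f n : Nat) (l : List Char) (h : n / 10 = 0) :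
    Nat.toDigitsCore 10 (f + 1) n l = (n % 10).digitChar :: l := by
  rw [Nat.toDigitsCore.eq_def]; simp [h]

lemma pvTDC_step (f n : Nat) (l : List Char) (h : ¬ n / 10 = 0) :
    Nat.toDigitsCore 10 (f + 1) n l = Nat.toDigitsCore 10 f (n / 10) ((n % 10).digitChar :: l) := by
  rw [Nat.toDigitsCore.eq_def]; simp [h]

-- one fuel step appends at least one character
lemma pvToDigitsCore_lt (f : Nat) : ∀ (n : Nat) (l : List Char),
    l.length < (Nat.toDigitsCore 10 (f + 1) n l).length := by
  induction f with
  | zero =>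
    intro n l
    by_cases h : n / 10 = 0
    · rw [pvTDC_stop 0 n l h]; simp
    · rw [pvTDC_step 0 n l h, Nat.toDigitsCore.eq_def]; simp
  | succ f ih =>
    intro n l
    by_cases h : n / 10 = 0
    · rw [pvTDC_stop (f + 1) n l h]; simp
    · rw [pvTDC_step (f + 1) n l h]
      calc l.length < ((n % 10).digitChar :: l).length := by simp
        _ < _ := ih (n / 10) ((n % 10).digitChar :: l)

lemma pvLenNat2 (n : Nat) (h1 : 10 ≤ n) (h2 : n < 100) : (Nat.toDigits 10 n).length = 2 := by
  have hub : (Nat.toDigits 10 n).length ≤ 2 := Nat.toDigits_length 10 n 2 (by norm_num) (by norm_num; omega)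
  have hne : ¬ n / 10 = 0 := by omega
  obtain ⟨f, rfl⟩ : ∃ f, n = f + 1 := ⟨n - 1, by omega⟩
  have hlb : 1 < (Nat.toDigits 10 (f + 1)).length := by
    rw [Nat.toDigits, pvTDC_step (f + 1) (f + 1) [] hne]
    have := pvToDigitsCore_lt f ((f + 1) / 10) [((f + 1) % 10).digitChar]
    simpa using this
  omega

lemma pvLenNat3 (n : Nat) (h1 : 100 ≤ n) (h2 : n < 1000) : (Nat.toDigits 10 n).length = 3 := by
  have hub : (Nat.toDigits 10 n).length ≤ 3 := Nat.toDigits_length 10 n 3 (by norm_num) (by norm_num; omega)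
  have hne : ¬ n / 10 = 0 := by omega
  have hne2 : ¬ n / 10 / 10 = 0 := by omega
  obtain ⟨f, rfl⟩ : ∃ f, n = f + 2 := ⟨n - 2, by omega⟩
  have hlb : 2 < (Nat.toDigits 10 (f + 2)).length := by
    rw [Nat.toDigits]
    have e1 := pvTDC_step (f + 2) (f + 2) [] hne
    rw [show (f + 2) + 1 = f + 2 + 1 by omega] at e1
    rw [e1]
    have e2 := pvTDC_step (f + 1) ((f + 2) / 10) [((f + 2) % 10).digitChar] hne2
    rw [show (f + 1) + 1 = f + 2 by omega] at e2
    rw [e2]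
    have := pvToDigitsCore_lt f ((f + 2) / 10 / 10)
      [((f + 2) / 10 % 10).digitChar, ((f + 2) % 10).digitChar]
    simpa using this
  omega

lemma pvLen1 (v : Int) (h0 : 0 ≤ v) (h : v < 10) : (PySem.Int.toChars v).length = 1 := by
  have hv : v.toNat / 10 = 0 := by omega
  rw [PySem.Int.toChars, if_neg (by omega), Nat.toDigits, pvTDC_stop v.toNat v.toNat [] hv]
  simp

lemma pvLen2 (v : Int) (h0 : 10 ≤ v) (h : v < 100) : (PySem.Int.toChars v).length = 2 := by
  rw [PySem.Int.toChars, if_neg (by omega)]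
  exact pvLenNat2 v.toNat (by omega) (by omega)

lemma pvLen3 (v : Int) (h0 : 100 ≤ v) (h : v < 1000) : (PySem.Int.toChars v).length = 3 := by
  rw [PySem.Int.toChars, if_neg (by omega)]
  exact pvLenNat3 v.toNat (by omega) (by omega)

-- A's branchy helper computes exactly the splice pvPf, for any residue number it covers.
lemma pvMfc_eq (line : String) (v : Int) (h3 : 3 ≤ v) (h : v ≤ 999) :
    modify_fifth_column line v = some (String.ofList (pvPf v line.toList)) := by
  unfold modify_fifth_column pvPf
  rcases lt_or_ge v 10 with h10 | h10
  · rw [pvLen1 v (by omega) h10]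
    simp only [if_pos h10]
    norm_num
  rcases lt_or_ge v 100 with h100 | h100
  · rw [pvLen2 v h10 h100]
    simp only [if_neg (not_lt.mpr h10), if_pos (And.intro h10 h100)]
    norm_num
  · rw [pvLen3 v h100 (by omega)]
    simp only [if_neg (not_lt.mpr (by omega : (10:Int) ≤ v)),
      if_neg (by omega : ¬ (10 ≤ v ∧ v < 100)), if_pos (And.intro h100 (by omega : v < 1000))]
    norm_num

-- A's counter-threading loop computes pvSpec.
lemma pvA_go (n : Nat) (hn : 0 < n) :
    ∀ (lines : List String) (s : Nat) (acc : List String),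
    s + lines.length ≤ 997 * n →
    ((PySem.List.enumerate lines (s : Int)).foldl
      (fun st p =>
        let modified_line := (modify_fifth_column p.2 st.2).getD ""
        let increment_value := if PySem.Int.mod (p.1 + 1) (n : Int) = 0 then st.2 + 1 else st.2
        (st.1 ++ [modified_line], increment_value))
      (acc, 3 + ((s / n : Nat) : Int))).1 = acc ++ pvSpec n s lines := by
  intro lines
  induction lines with
  | nil => intro s acc _; simp [pvSpec, PySem.List.enumerate_nil]
  | cons line rest ih =>
    intro s acc hb
    rw [PySem.List.enumerate_cons]
    simp only [List.foldl_cons]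
    have hs : s < 997 * n := by simp at hb; omega
    have hdivle : s / n ≤ 996 := by
      have := (Nat.div_lt_iff_lt_mul hn).mpr (by omega : s < 997 * n)
      omega
    have hq0 : (0 : Int) ≤ ((s / n : Nat) : Int) := by exact_mod_cast Nat.zero_le _
    have hq9 : ((s / n : Nat) : Int) ≤ 996 := by exact_mod_cast hdivle
    rw [pvMfc_eq line _ (by omega) (by omega)]
    have hmod : PySem.Int.mod ((s : Int) + 1) (n : Int) = (((s + 1) % n : Nat) : Int) := by
      rw [show ((s : Int) + 1) = ((s + 1 : Nat) : Int) by push_cast; ring, PySem.Int.mod_natCast]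
    have hinc : (if PySem.Int.mod ((s : Int) + 1) (n : Int) = 0
        then 3 + ((s / n : Nat) : Int) + 1 else 3 + ((s / n : Nat) : Int))
        = 3 + (((s + 1) / n : Nat) : Int) := by
      rw [hmod, Nat.succ_div]
      by_cases hd : n ∣ s + 1
      · rw [if_pos (by exact_mod_cast Nat.dvd_iff_mod_eq_zero.mp hd)]
        simp [hd]; ring
      · rw [if_neg (by
          simp only [Int.natCast_eq_zero]
          exact fun hc => hd (Nat.dvd_iff_mod_eq_zero.mpr hc))]
        simp [hd]
    simp only [Option.getD_some]
    rw [show ((s : Int) + 1) = (((s + 1 : Nat)) : Int) by push_cast; ring] at hinc ⊢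
    have := ih (s + 1) (acc ++ [String.ofList (pvPf (3 + ((s / n : Nat) : Int)) line.toList)]) (by simp at hb ⊢; omega)
    rw [hinc]
    rw [this, pvSpec]
    simp

-- splitting pvSpec at a block boundary
lemma pvSpec_shift (n : Nat) (hn : 0 < n) :
    ∀ (j : Nat), j ≤ n → ∀ (k : Nat) (r : List String),
    pvSpec n (k * n + (n - j)) r
      = (r.take j).map (fun line => String.ofList (pvPf (3 + (k : Int)) line.toList))
        ++ pvSpec n ((k + 1) * n) (r.drop j) := by
  intro j
  induction j with
  | zero =>
    intro _ k r
    rw [show k * n + (n - 0) = (k + 1) * n by rw [Nat.sub_zero]; ring]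
    simp
  | succ j ih =>
    intro hj k r
    cases r with
    | nil => simp [pvSpec]
    | cons x rest =>
      rw [pvSpec]
      have ht : n - (j + 1) < n := by omega
      have hdiv : (k * n + (n - (j + 1))) / n = k := by
        rw [Nat.mul_comm k n, Nat.mul_add_div hn]
        simp [Nat.div_eq_of_lt ht]
      have hnext : k * n + (n - (j + 1)) + 1 = k * n + (n - j) := by omega
      rw [hdiv, hnext, ih (by omega) k rest]
      simp

lemma pvSpec_chunk (n : Nat) (hn : 0 < n) (k : Nat) (r : List String) :
    pvSpec n (k * n) r
      = (r.take n).map (fun line => String.ofList (pvPf (3 + (k : Int)) line.toList))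
        ++ pvSpec n ((k + 1) * n) (r.drop n) := by
  have := pvSpec_shift n hn n (le_refl n) k r
  simpa using this

lemma pvChunks (n : Nat) (hn : 0 < n) (lines : List String) :
    ∀ (c k : Nat), lines.length ≤ (k + c) * n →
    pvSpec n (k * n) (lines.drop (k * n))
      = (List.range' k c).flatMap (fun j =>
          ((lines.drop (j * n)).take n).map (fun line => String.ofList (pvPf (3 + (j : Int)) line.toList))) := by
  intro c
  induction c with
  | zero =>
    intro k hb
    have : lines.drop (k * n) = [] := by
      apply List.drop_eq_nil_of_le; simpa using hb
    simp [this, pvSpec]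
  | succ c ih =>
    intro k hb
    rw [List.range'_succ, List.flatMap_cons]
    rw [pvSpec_chunk n hn k (lines.drop (k * n))]
    rw [List.drop_drop, show k * n + n = (k + 1) * n by ring]
    rw [ih (k + 1) (by have : (k + 1 + c) * n = (k + (c + 1)) * n := by ring
                       omega)]

-- ===== VERDICT (by name: the statement is the Claim_ definition above) =====
theorem modify_solvent_columns_spec : Claim_equal_modify_solvent_columns := by
  intro lines a _ hpre
  obtain ⟨hapos, hlen⟩ := hpre
  obtain ⟨n, rfl⟩ : ∃ n : Nat, a = (n : Int) := ⟨a.toNat, by omega⟩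
  have hn : 0 < n := by exact_mod_cast hapos
  unfold Spec_modify_solvent_columns
  have hlenN : lines.length ≤ 997 * n := by exact_mod_cast hlen
  -- A's loop computes pvSpec
  have hA : modify_solvent_columns lines (n : Int) = pvSpec n 0 lines := by
    unfold modify_solvent_columns
    have := pvA_go n hn lines 0 [] (by omega)
    simpa using this
  -- B's block loop computes pvSpec
  have hB : modify_solvent_columns_alt lines (n : Int) = pvSpec n 0 lines := by
    have hnpos : (0 : Int) < (n : Int) := by exact_mod_cast hn
    simp only [modify_solvent_columns_alt]
    rw [PySem.List.pyRange_of_pos 0 (lines.length : Int) hnpos, List.foldl_map,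
      PySem.List.foldl_append_eq_flatMap, List.nil_append]
    set c : Nat := (if (0 : Int) < (lines.length : Int) then
        (((lines.length : Int) - 0 + (n : Int) - 1) / (n : Int)).toNat else 0) with hc
    have hcbound : lines.length ≤ c * n := by
      by_cases hL : (0 : Int) < (lines.length : Int)
      · rw [hc, if_pos hL]
        have hL1 : 1 ≤ lines.length := by exact_mod_cast hL
        have e1 : (lines.length : Int) - 0 + (n : Int) - 1 = ((lines.length + n - 1 : Nat) : Int) := by
          omega
        rw [e1, show ((lines.length + n - 1 : Nat) : Int) / (n : Int)
              = (((lines.length + n - 1) / n : Nat) : Int) from (Int.natCast_ediv _ _).symm,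
          Int.toNat_natCast]
        have hdm := Nat.div_add_mod (lines.length + n - 1) n
        have hr : (lines.length + n - 1) % n < n := Nat.mod_lt _ hn
        calc lines.length ≤ n * ((lines.length + n - 1) / n) := by omega
          _ = ((lines.length + n - 1) / n) * n := Nat.mul_comm _ _
      · rw [hc, if_neg hL]
        have : lines.length = 0 := by omega
        simp [this]
    have hchunks := pvChunks n hn lines c 0 (by simpa using hcbound)
    simp only [Nat.zero_mul, List.drop_zero] at hchunks
    rw [← List.range_eq_range'] at hchunks
    rw [hchunks]
    refine congrArg (fun f => List.flatMap f (List.range c)) (funext fun k => ?_)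
    have e1 : (0 : Int) + (n : Int) * (k : Int) = ((n * k : Nat) : Int) := by push_cast; ring
    rw [e1, show ((n * k : Nat) : Int) + (n : Int) = ((n * k + n : Nat) : Int) by push_cast; ring,
      PySem.List.slice_natCast lines (n * k) (n * k + n),
      PySem.Int.floordiv_natCast (n * k) n, Nat.mul_div_cancel_left k hn]
    simp [pvPf, show n * k + n - n * k = n by omega, Nat.mul_comm]
  rw [hA, hB]
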